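-- pv_equiv track=rewrite | github.com/djdarcy/Prime-Square-Sum | verification/trisum_recast_demonstration.py | build_digit_triangle
-- ===== SOURCE A (Python) =====
-- def build_digit_triangle(base: int, n_rows: int) -> list[list[int]]:
--     """
--     Build a triangle of digits 0 through base-1, arranged with
--     n_rows rows (bottom row has n_rows digits, top row has 1 digit).
--
--     For base = Tri[n], we have exactly Tri[n] digits (0 to Tri[n]-1)
--     which fill a triangle of n rows perfectly.
--     """
--     triangle = []
--     current_digit = 0
--
--     # Build from bottom (n_rows digits) to top (1 digit)
--     for row_size in range(n_rows, 0, -1):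
--         row = []
--         for _ in range(row_size):
--             row.append(current_digit)
--             current_digit += 1
--         triangle.append(row)
--
--     return triangle
-- ===== SOURCE B (Python) =====
-- def build_digit_triangle(base: int, n_rows: int) -> list[list[int]]:
--     if n_rows <= 0:
--         return []
--     total = n_rows * (n_rows + 1) // 2
--     flat = list(range(total))
--     triangle = []
--     offset = 0
--     for size in range(n_rows, 0, -1):
--         triangle.append(flat[offset:offset + size])
--         offset += size
--     return triangle
-- ===== Notes on version B (the rewrite author's own statement) =====
-- stated objective: alternative
-- what changed: B pre-materialises the full digit sequence list(range(total)) via the closed-form triangular total and partitions it into rows by slicing off chunks with a moving offset, instead of A's nested loop appending digits one at a time from an incrementing counter.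
import Mathlib
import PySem

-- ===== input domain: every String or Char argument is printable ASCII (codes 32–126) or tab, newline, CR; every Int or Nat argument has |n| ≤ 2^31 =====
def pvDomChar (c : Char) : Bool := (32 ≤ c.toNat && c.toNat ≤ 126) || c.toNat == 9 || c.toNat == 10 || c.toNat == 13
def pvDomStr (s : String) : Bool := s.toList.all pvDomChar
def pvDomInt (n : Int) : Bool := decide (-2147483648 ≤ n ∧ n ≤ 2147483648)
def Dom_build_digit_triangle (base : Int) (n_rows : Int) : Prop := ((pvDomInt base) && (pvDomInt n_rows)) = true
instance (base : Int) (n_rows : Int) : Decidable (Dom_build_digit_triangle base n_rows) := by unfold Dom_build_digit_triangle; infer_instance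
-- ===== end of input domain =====

-- B partitions a prebuilt list(range(total)) into rows by slicing with a moving offset,
-- instead of A's nested counter loop (alternative decomposition, same cost).

-- ===== PORT A =====
def build_digit_triangle (base : Int) (n_rows : Int) : List (List Int) :=
  ((PySem.List.pyRange n_rows 0 (-1)).foldl
    (fun (st : List (List Int) × Int) row_size =>
      let rc := (PySem.List.pyRange 0 row_size 1).foldl
        (fun (rc : List Int × Int) _ => (rc.1 ++ [rc.2], rc.2 + 1)) ([], st.2)
      (st.1 ++ [rc.1], rc.2)) ([], 0)).1

-- ===== PORT B =====
def build_digit_triangle_alt (base : Int) (n_rows : Int) : List (List Int) :=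
  if n_rows ≤ 0 then [] else
  let total := PySem.Int.floordiv (n_rows * (n_rows + 1)) 2
  let flat := PySem.List.pyRange 0 total 1
  ((PySem.List.pyRange n_rows 0 (-1)).foldl
    (fun (st : List (List Int) × Int) size =>
      (st.1 ++ [PySem.List.slice flat (some st.2) (some (st.2 + size))], st.2 + size)) ([], 0)).1

-- ===== PRECONDITION & SPEC =====
def Spec_build_digit_triangle (base : Int) (n_rows : Int) (out : List (List Int)) : Prop := out = build_digit_triangle_alt base n_rows
instance (base : Int) (n_rows : Int) (out : List (List Int)) : Decidable (Spec_build_digit_triangle base n_rows out) := by unfold Spec_build_digit_triangle; infer_instance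

-- ===== CLAIM (what is proved, stated in full; the proofs are below) =====
def Claim_equal_build_digit_triangle : Prop := ∀ (base : Int) (n_rows : Int), Dom_build_digit_triangle base n_rows → Spec_build_digit_triangle base n_rows (build_digit_triangle base n_rows)

-- ===== LEMMAS AND PROOFS =====

-- A's inner loop: appending an incrementing counter l.length times produces a range segment.
theorem inner_row (l : List Int) (r : List Int) (c : Int) :
    l.foldl (fun (rc : List Int × Int) _ => (rc.1 ++ [rc.2], rc.2 + 1)) (r, c)
      = (r ++ PySem.List.pyRange c (c + l.length) 1, c + l.length) := by
  induction l generalizing r c with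
  | nil => simp [PySem.List.pyRange_one_eq_nil (le_refl c)]
  | cons x t ih =>
    simp only [List.foldl_cons, ih (r ++ [c]) (c + 1), List.length_cons]
    push_cast
    rw [PySem.List.pyRange_one_cons (by omega : c < c + ((t.length : Int) + 1))]
    rw [show c + 1 + (t.length : Int) = c + ((t.length : Int) + 1) from by ring]
    simp

-- Slicing a prebuilt range: flat[c : c+s] is the range segment, when it fits.
theorem slice_range (total c s : Int) (hc : 0 ≤ c) (hs : 0 ≤ s) (hcs : c + s ≤ total) :
    PySem.List.slice (PySem.List.pyRange 0 total 1) (some c) (some (c + s))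
      = PySem.List.pyRange c (c + s) 1 := by
  rw [PySem.List.slice_toNat _ hc (by omega)]
  rw [PySem.List.pyRange_one_append 0 c total hc (by omega)]
  rw [List.drop_left' (by simp [PySem.List.length_pyRange_one] :
       (PySem.List.pyRange 0 c 1).length = c.toNat)]
  rw [PySem.List.pyRange_one_append c (c + s) total (by omega) (by omega)]
  rw [List.take_left' (by simp [PySem.List.length_pyRange_one]; omega :
       (PySem.List.pyRange c (c + s) 1).length = (c + s).toNat - c.toNat)]

-- Both outer loops advance the same cursor and append equal rows.
theorem outer_eq (total : Int) (sizes : List Int) :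
    ∀ (acc : List (List Int)) (c : Int), 0 ≤ c → (∀ s ∈ sizes, 0 < s) →
    c + sizes.sum ≤ total →
    (sizes.foldl
      (fun (st : List (List Int) × Int) row_size =>
        let rc := (PySem.List.pyRange 0 row_size 1).foldl
          (fun (rc : List Int × Int) _ => (rc.1 ++ [rc.2], rc.2 + 1)) ([], st.2)
        (st.1 ++ [rc.1], rc.2)) (acc, c))
    = (sizes.foldl
      (fun (st : List (List Int) × Int) size =>
        (st.1 ++ [PySem.List.slice (PySem.List.pyRange 0 total 1) (some st.2) (some (st.2 + size))], st.2 + size))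
      (acc, c)) := by
  induction sizes with
  | nil => intro acc c _ _ _; rfl
  | cons s t ih =>
    intro acc c hc hpos hsum
    have hs : 0 < s := hpos s (List.mem_cons_self)
    have htpos : ∀ x ∈ t, 0 < x := fun x hx => hpos x (List.mem_cons_of_mem _ hx)
    have htsum : 0 ≤ t.sum := List.sum_nonneg (fun x hx => le_of_lt (htpos x hx))
    simp only [List.foldl_cons, List.sum_cons] at *
    rw [inner_row]
    have hlen : ((PySem.List.pyRange 0 s 1).length : Int) = s := by
      simp [PySem.List.length_pyRange_one]; omega
    rw [hlen]
    rw [slice_range total c s hc (le_of_lt hs) (by omega)]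
    exact ih (acc ++ [PySem.List.pyRange c (c + s) 1]) (c + s) (by omega) htpos (by omega)

-- Every size in range(n, 0, -1) is positive, and their sum is the triangular number.
theorem sum_countdown_aux (k : Nat) : ∀ (n : Int), n.toNat = k → 0 ≤ n →
    2 * (PySem.List.pyRange n 0 (-1)).sum = n * (n + 1) := by
  induction k with
  | zero =>
    intro n hk hn
    have : n = 0 := by omega
    subst this
    simp [PySem.List.pyRange_neg_one_eq_nil (le_refl (0 : Int))]
  | succ k ih =>
    intro n hk hn
    rw [PySem.List.pyRange_neg_one_cons (by omega : (0 : Int) < n)]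
    rw [List.sum_cons]
    have := ih (n - 1) (by omega) (by omega)
    nlinarith [this]

theorem sum_countdown (n : Int) (hn : 0 ≤ n) :
    2 * (PySem.List.pyRange n 0 (-1)).sum = n * (n + 1) :=
  sum_countdown_aux n.toNat n rfl hn

-- ===== VERDICT (by name: the statement is the Claim_ definition above) =====
theorem build_digit_triangle_spec : Claim_equal_build_digit_triangle := by
  intro base n_rows _
  unfold Spec_build_digit_triangle build_digit_triangle build_digit_triangle_alt
  by_cases hn : n_rows ≤ 0
  · rw [PySem.List.pyRange_neg_one_eq_nil hn, if_pos hn]; rfl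
  · rw [if_neg hn]
    have hn : 0 < n_rows := by omega
    have hsum := sum_countdown n_rows (le_of_lt hn)
    have hfd : PySem.Int.floordiv (n_rows * (n_rows + 1)) 2
        = (PySem.List.pyRange n_rows 0 (-1)).sum := by
      rw [PySem.Int.floordiv_eq_ediv_of_pos (by omega)]
      omega
    rw [hfd]
    rw [outer_eq ((PySem.List.pyRange n_rows 0 (-1)).sum) (PySem.List.pyRange n_rows 0 (-1))
      [] 0 (le_refl 0)
      (fun s hs => ((PySem.List.mem_pyRange_neg_one).1 hs).1)
      (by omega)]
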